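-- pv_equiv track=rewrite | github.com/fahrrad/euler | eight.py | five_sum_yielder
-- ===== SOURCE A (Python) =====
-- def five_sum_yielder(total):
--     """yields all the combination of 5 numbers where the sum is 'sum'
--     The last number in the tuple has always to be same or bigger than the other 4"""
--
--     def normal_range(to_incl):
--         return range(1, to_incl+1)
--
--     for a in normal_range(total):
--         for b in normal_range(total - a):
--             for c in normal_range(total - a - b):
--                 for d in normal_range(total - a - b - c):
--                     max_i = max(a, b, c, d)
--                     for e in normal_range(max_i):
--                         if euler_8_p([a, b, c, d, e]):
--                             yield [a, b, c, d, e]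
--
-- def euler_8_p(l):
--     """
--     >>> euler_8_p([2,3,1,5,1])
--     False
--     >>> euler_8_p([1,2,3,1,3])
--     True
--     >>> euler_8_p([2,3,1,5,7])
--     False
--     """
--     if 0 in l:
--         return False
--     if sum(l) > 1000:
--         return False
--     if l[-1] < max(l[:-1]):
--         return False
--     if l[-1] > max(l[:-1]) + 1:
--         return False
--
--     return True
-- ===== SOURCE B (Python) =====
-- def five_sum_yielder(total):
--     """yields all the combination of 5 numbers where the sum is 'sum'
--     The last number in the tuple has always to be same or bigger than the other 4"""
--     for a in range(1, total + 1):
--         for b in range(1, total - a + 1):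
--             for c in range(1, total - a - b + 1):
--                 for d in range(1, total - a - b - c + 1):
--                     e = max(a, b, c, d)
--                     if a + b + c + d + e <= 1000:
--                         yield [a, b, c, d, e]
-- ===== Notes on version B (the rewrite author's own statement) =====
-- stated objective: faster
-- what changed: B drops A's innermost loop over e (only e = max(a,b,c,d) can pass euler_8_p's bounds) and emits that single candidate directly, filtered by euler_8_p's fixed sum bound, as a nested comprehension instead of an inner scan plus predicate calls.
import Mathlib
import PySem

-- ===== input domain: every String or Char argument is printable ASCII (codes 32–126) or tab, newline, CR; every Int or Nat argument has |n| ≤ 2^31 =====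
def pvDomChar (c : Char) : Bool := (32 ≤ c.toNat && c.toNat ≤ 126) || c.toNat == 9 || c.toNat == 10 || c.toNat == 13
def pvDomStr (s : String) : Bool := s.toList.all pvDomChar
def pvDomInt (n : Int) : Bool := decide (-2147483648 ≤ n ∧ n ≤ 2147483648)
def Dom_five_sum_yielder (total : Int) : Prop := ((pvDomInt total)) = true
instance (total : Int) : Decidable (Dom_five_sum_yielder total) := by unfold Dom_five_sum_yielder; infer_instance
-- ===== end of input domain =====

-- B drops A's innermost e-loop: the only e that can pass is e = max(a,b,c,d), so B emits it
-- directly as a nested comprehension filtered by the sum bound (objective: faster, asymptotic).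

-- ===== PORT A =====
-- literal port of euler_8_p; the catch-all arm is only the totalization of Python's
-- IndexError/ValueError on lists shorter than 2 — A calls it with 5-element lists only
def euler_8_p (l : List Int) : Bool :=
  if l.contains 0 then false
  else if l.sum > 1000 then false
  else
    match PySem.List.pyGet? l (-1), PySem.List.max? (PySem.List.slice l none (some (-1))) (fun y => y) with
    | some last, some m =>
      if last < m then false
      else if last > m + 1 then false
      else true
    | _, _ => false

def five_sum_yielder (total : Int) : List (List Int) :=
  (PySem.List.pyRange 1 (total + 1) 1).foldl (fun acc a =>
    (PySem.List.pyRange 1 (total - a + 1) 1).foldl (fun acc b =>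
      (PySem.List.pyRange 1 (total - a - b + 1) 1).foldl (fun acc c =>
        (PySem.List.pyRange 1 (total - a - b - c + 1) 1).foldl (fun acc d =>
          let max_i := max (max (max a b) c) d
          (PySem.List.pyRange 1 (max_i + 1) 1).foldl (fun acc e =>
            if euler_8_p [a, b, c, d, e] then acc ++ [[a, b, c, d, e]] else acc) acc)
          acc) acc) acc) []

-- ===== PORT B =====
def five_sum_yielder_alt (total : Int) : List (List Int) :=
  (PySem.List.pyRange 1 (total + 1) 1).flatMap (fun a =>
    (PySem.List.pyRange 1 (total - a + 1) 1).flatMap (fun b =>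
      (PySem.List.pyRange 1 (total - a - b + 1) 1).flatMap (fun c =>
        ((PySem.List.pyRange 1 (total - a - b - c + 1) 1).filter (fun d =>
            a + b + c + d + max (max (max a b) c) d ≤ 1000)).map (fun d =>
          [a, b, c, d, max (max (max a b) c) d]))))

-- ===== PRECONDITION & SPEC =====
def Spec_five_sum_yielder (total : Int) (out : List (List Int)) : Prop := out = five_sum_yielder_alt total
instance (total : Int) (out : List (List Int)) : Decidable (Spec_five_sum_yielder total out) := by unfold Spec_five_sum_yielder; infer_instance

-- ===== CLAIM (what is proved, stated in full; the proofs are below) =====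
def Claim_equal_five_sum_yielder : Prop := ∀ (total : Int), Dom_five_sum_yielder total → Spec_five_sum_yielder total (five_sum_yielder total)

-- ===== LEMMAS AND PROOFS =====

-- euler_8_p on a 5-element positive list whose last entry is below the max of the first four
theorem euler_8_p_lt {a b c d e : Int} (he : e < max (max (max a b) c) d) :
    euler_8_p [a, b, c, d, e] = false := by
  unfold euler_8_p
  simp only [PySem.List.pyGet?_neg_one, PySem.List.slice_to_neg_one]
  simp only [List.dropLast, List.getLast?]
  rw [PySem.List.max?_id_cons]
  simp only [List.foldl]
  split_ifs with h1 h2 h3 <;> simp_all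

-- euler_8_p at e = max of the first four positive entries is exactly the sum bound
theorem euler_8_p_max {a b c d : Int} (ha : 1 ≤ a) (hb : 1 ≤ b) (hc : 1 ≤ c) (hd : 1 ≤ d) :
    euler_8_p [a, b, c, d, max (max (max a b) c) d] =
      decide (a + b + c + d + max (max (max a b) c) d ≤ 1000) := by
  unfold euler_8_p
  simp only [PySem.List.pyGet?_neg_one, PySem.List.slice_to_neg_one]
  simp only [List.dropLast, List.getLast?]
  rw [PySem.List.max?_id_cons]
  simp only [List.foldl]
  split_ifs with h1 h2 h3 h4 <;> simp_all <;> omega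

-- A's innermost e-loop contributes exactly B's single candidate
theorem inner_loop_eq (a b c d : Int) (ha : 1 ≤ a) (hb : 1 ≤ b) (hc : 1 ≤ c) (hd : 1 ≤ d)
    (acc : List (List Int)) :
    (PySem.List.pyRange 1 (max (max (max a b) c) d + 1) 1).foldl (fun acc e =>
        if euler_8_p [a, b, c, d, e] then acc ++ [[a, b, c, d, e]] else acc) acc =
      if a + b + c + d + max (max (max a b) c) d ≤ 1000 then
        acc ++ [[a, b, c, d, max (max (max a b) c) d]] else acc := by
  set m := max (max (max a b) c) d with hm
  have hm1 : 1 ≤ m := le_trans ha (by simp [hm])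
  rw [PySem.List.foldl_append_if (fun e => euler_8_p [a, b, c, d, e]) (fun e => [a, b, c, d, e])]
  rw [PySem.List.pyRange_one_succ_right hm1, List.filter_append]
  have hnil : (PySem.List.pyRange 1 m 1).filter (fun e => euler_8_p [a, b, c, d, e]) = [] := by
    rw [List.filter_eq_nil_iff]
    intro e hem
    have := PySem.List.mem_pyRange_one.mp hem
    simp [euler_8_p_lt (show e < m by omega)]
  rw [hnil]
  simp only [List.nil_append, List.filter_cons, List.filter_nil]
  rw [euler_8_p_max ha hb hc hd]
  have hrw : max a (max b (max c d)) = m := by simp [hm, max_assoc]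
  by_cases hs : a + b + c + d + m ≤ 1000 <;> simp [hs, hrw]

-- level-by-level replacement of A's nested loops by B's comprehension, innermost first
theorem level_d (a b c n : Int) (ha : 1 ≤ a) (hb : 1 ≤ b) (hc : 1 ≤ c) (acc : List (List Int)) :
    (PySem.List.pyRange 1 n 1).foldl (fun acc d =>
        let max_i := max (max (max a b) c) d
        (PySem.List.pyRange 1 (max_i + 1) 1).foldl (fun acc e =>
          if euler_8_p [a, b, c, d, e] then acc ++ [[a, b, c, d, e]] else acc) acc) acc =
      acc ++ ((PySem.List.pyRange 1 n 1).filter (fun d =>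
          a + b + c + d + max (max (max a b) c) d ≤ 1000)).map (fun d =>
        [a, b, c, d, max (max (max a b) c) d]) := by
  rw [← PySem.List.foldl_append_if (fun d => decide (a + b + c + d + max (max (max a b) c) d ≤ 1000))
        (fun d => [a, b, c, d, max (max (max a b) c) d])]
  apply PySem.List.foldl_congr_mem'
  intro d hdmem acc
  have hd := (PySem.List.mem_pyRange_one.mp hdmem).1
  have h := inner_loop_eq a b c d ha hb hc hd acc
  simpa using h

theorem level_c (a b : Int) (ha : 1 ≤ a) (hb : 1 ≤ b) (n : Int) (f : Int → Int)
    (acc : List (List Int)) :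
    (PySem.List.pyRange 1 n 1).foldl (fun acc c =>
        (PySem.List.pyRange 1 (f c) 1).foldl (fun acc d =>
          let max_i := max (max (max a b) c) d
          (PySem.List.pyRange 1 (max_i + 1) 1).foldl (fun acc e =>
            if euler_8_p [a, b, c, d, e] then acc ++ [[a, b, c, d, e]] else acc) acc) acc) acc =
      acc ++ (PySem.List.pyRange 1 n 1).flatMap (fun c =>
        ((PySem.List.pyRange 1 (f c) 1).filter (fun d =>
            a + b + c + d + max (max (max a b) c) d ≤ 1000)).map (fun d =>
          [a, b, c, d, max (max (max a b) c) d])) := by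
  rw [← PySem.List.foldl_append_eq_flatMap]
  apply PySem.List.foldl_congr_mem'
  intro c hcmem acc
  have hc := (PySem.List.mem_pyRange_one.mp hcmem).1
  exact level_d a b c (f c) ha hb hc acc

-- ===== VERDICT (by name: the statement is the Claim_ definition above) =====
theorem five_sum_yielder_spec : Claim_equal_five_sum_yielder := by
  intro total _
  unfold Spec_five_sum_yielder five_sum_yielder five_sum_yielder_alt
  rw [show (PySem.List.pyRange 1 (total + 1) 1).flatMap (fun a =>
        (PySem.List.pyRange 1 (total - a + 1) 1).flatMap (fun b =>
          (PySem.List.pyRange 1 (total - a - b + 1) 1).flatMap (fun c =>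
            ((PySem.List.pyRange 1 (total - a - b - c + 1) 1).filter (fun d =>
                a + b + c + d + max (max (max a b) c) d ≤ 1000)).map (fun d =>
              [a, b, c, d, max (max (max a b) c) d])))) =
      [] ++ (PySem.List.pyRange 1 (total + 1) 1).flatMap (fun a =>
        (PySem.List.pyRange 1 (total - a + 1) 1).flatMap (fun b =>
          (PySem.List.pyRange 1 (total - a - b + 1) 1).flatMap (fun c =>
            ((PySem.List.pyRange 1 (total - a - b - c + 1) 1).filter (fun d =>
                a + b + c + d + max (max (max a b) c) d ≤ 1000)).map (fun d =>
              [a, b, c, d, max (max (max a b) c) d])))) from rfl,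
     ← PySem.List.foldl_append_eq_flatMap]
  apply PySem.List.foldl_congr_mem'
  intro a hamem acc
  have ha := (PySem.List.mem_pyRange_one.mp hamem).1
  rw [← PySem.List.foldl_append_eq_flatMap]
  apply PySem.List.foldl_congr_mem'
  intro b hbmem acc
  have hb := (PySem.List.mem_pyRange_one.mp hbmem).1
  exact level_c a b ha hb (total - a - b + 1) (fun c => total - a - b - c + 1) acc
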